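-- pv_equiv track=rewrite | github.com/alexkroman/tiny-audio | scripts/eval/evaluators/mcq.py | match_to_choice
-- ===== SOURCE A (Python) =====
-- def match_to_choice(prediction: str, choices: list[str]) -> str:
--     """Match model prediction to one of the available choices."""
--     prediction_lower = prediction.lower().strip()
--
--     # Direct match
--     for choice in choices:
--         if choice.lower() == prediction_lower:
--             return choice
--
--     # Check if prediction contains choice letter like "(A)" or "A"
--     for choice in choices:
--         # Extract letter from choice like "(A) Man" -> "A"
--         if choice.startswith("(") and ")" in choice:
--             letter = choice[1 : choice.index(")")]
--             if f"({letter})" in prediction or prediction_lower.startswith(letter.lower()):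
--                 return choice
--
--     # Substring match
--     for choice in choices:
--         if choice.lower() in prediction_lower:
--             return choice
--
--     return prediction
-- ===== SOURCE B (Python) =====
-- def match_to_choice(prediction: str, choices: list[str]) -> str:
--     """Match model prediction to one of the available choices (single pass)."""
--     prediction_lower = prediction.lower().strip()
--     letter_hit = None
--     sub_hit = None
--     for choice in choices:
--         choice_lower = choice.lower()
--         if choice_lower == prediction_lower:
--             return choice  # first exact match wins globally
--         if letter_hit is None and choice.startswith("(") and ")" in choice:
--             letter = choice[1 : choice.index(")")]
--             if f"({letter})" in prediction or prediction_lower.startswith(letter.lower()):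
--                 letter_hit = choice
--         if sub_hit is None and choice_lower in prediction_lower:
--             sub_hit = choice
--     if letter_hit is not None:
--         return letter_hit
--     if sub_hit is not None:
--         return sub_hit
--     return prediction
-- ===== Notes on version B (the rewrite author's own statement) =====
-- stated objective: alternative
-- what changed: Replaces A's three sequential scans over choices by one left-to-right pass that returns on the first exact match and records the first letter-style match and first substring match in two local variables, resolving priority after the loop.
import Mathlib
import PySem

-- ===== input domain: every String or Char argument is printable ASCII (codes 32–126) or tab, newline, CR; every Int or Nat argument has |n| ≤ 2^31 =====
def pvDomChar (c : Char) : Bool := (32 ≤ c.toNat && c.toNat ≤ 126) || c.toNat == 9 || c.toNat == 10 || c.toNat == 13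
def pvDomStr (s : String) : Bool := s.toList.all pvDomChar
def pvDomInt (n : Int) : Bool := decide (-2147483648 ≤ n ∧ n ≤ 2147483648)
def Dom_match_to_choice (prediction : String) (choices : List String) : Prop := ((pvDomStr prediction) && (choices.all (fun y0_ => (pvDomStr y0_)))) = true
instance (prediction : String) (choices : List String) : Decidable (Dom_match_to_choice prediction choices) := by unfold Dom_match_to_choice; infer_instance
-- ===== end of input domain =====

-- B replaces A's three sequential scans over choices by one pass recording first letter/substring candidates; same cost, different decomposition.


-- ===== PORT A =====
-- the letter test 'choice.startswith("(") and ")" in choice and (f"({letter})" in prediction or prediction_lower.startswith(letter.lower()))'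
-- (this exact expression appears verbatim in both Pythons, so both ports share it)
def pvLetterCond (prediction pl c : String) : Bool :=
  PySem.Str.startswith c "(" && PySem.Str.isIn ")" c &&
    (let letter := PySem.Str.slice c (some 1) (some (PySem.Str.find c ")"))
     PySem.Str.isIn (String.ofList ('(' :: (letter.toList ++ [')']))) prediction
       || PySem.Str.startswith pl (PySem.Str.lower letter))

-- A's first loop: direct match
def pvLoop1 (pl : String) : List String → Option String
  | [] => none
  | c :: t => if PySem.Str.lower c == pl then some c else pvLoop1 pl t

-- A's second loop: choice-letter match
def pvLoop2 (prediction pl : String) : List String → Option String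
  | [] => none
  | c :: t => if pvLetterCond prediction pl c then some c else pvLoop2 prediction pl t

-- A's third loop: substring match
def pvLoop3 (pl : String) : List String → Option String
  | [] => none
  | c :: t => if PySem.Str.isIn (PySem.Str.lower c) pl then some c else pvLoop3 pl t

def match_to_choice (prediction : String) (choices : List String) : String :=
  let pl := PySem.Str.strip (PySem.Str.lower prediction)
  match pvLoop1 pl choices with
  | some c => c
  | none =>
    match pvLoop2 prediction pl choices with
    | some c => c
    | none =>
      match pvLoop3 pl choices with
      | some c => c
      | none => prediction

-- ===== PORT B =====
-- B's single pass: return on exact match, record first letter and first substring candidates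
def pvScan (prediction pl : String) (l : List String) (lm sm : Option String) : String :=
  match l, lm, sm with
  | [], lm, sm =>
    match lm with
    | some c => c
    | none =>
      match sm with
      | some c => c
      | none => prediction
  | c :: t, lm, sm =>
    let cl := PySem.Str.lower c
    if cl == pl then c
    else
      let lm' := if lm.isNone && pvLetterCond prediction pl c then some c else lm
      let sm' := if sm.isNone && PySem.Str.isIn cl pl then some c else sm
      pvScan prediction pl t lm' sm'

def match_to_choice_alt (prediction : String) (choices : List String) : String :=
  let pl := PySem.Str.strip (PySem.Str.lower prediction)
  pvScan prediction pl choices none none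

-- ===== PRECONDITION & SPEC =====
def Spec_match_to_choice (prediction : String) (choices : List String) (out : String) : Prop := out = match_to_choice_alt prediction choices
instance (prediction : String) (choices : List String) (out : String) : Decidable (Spec_match_to_choice prediction choices out) := by unfold Spec_match_to_choice; infer_instance

-- ===== CLAIM (what is proved, stated in full; the proofs are below) =====
def Claim_equal_match_to_choice : Prop := ∀ (prediction : String) (choices : List String), Dom_match_to_choice prediction choices → Spec_match_to_choice prediction choices (match_to_choice prediction choices)

-- ===== LEMMAS AND PROOFS =====

-- invariant of B's pass: carrying candidates lm/sm is A's three scans with lm/sm prepended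
theorem pvScan_eq (prediction pl : String) (l : List String) (lm sm : Option String) :
    pvScan prediction pl l lm sm =
      match pvLoop1 pl l with
      | some c => c
      | none =>
        match (lm.orElse fun _ => pvLoop2 prediction pl l) with
        | some c => c
        | none =>
          match (sm.orElse fun _ => pvLoop3 pl l) with
          | some c => c
          | none => prediction := by
  induction l generalizing lm sm with
  | nil =>
    cases lm <;> cases sm <;> simp [pvScan, pvLoop1, pvLoop2, pvLoop3, Option.orElse]
  | cons c t ih =>
    by_cases hx : PySem.Str.lower c == pl
    · simp [pvScan, pvLoop1, hx]
    · rw [show pvScan prediction pl (c :: t) lm sm =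
        pvScan prediction pl t
          (if lm.isNone && pvLetterCond prediction pl c then some c else lm)
          (if sm.isNone && PySem.Str.isIn (PySem.Str.lower c) pl then some c else sm) by
          simp [pvScan, hx]]
      rw [ih]
      cases lm <;> cases sm <;>
        simp [pvLoop1, pvLoop2, pvLoop3, hx, Option.orElse] <;>
        by_cases h2 : pvLetterCond prediction pl c <;>
        by_cases h3 : PySem.Chars.isIn (PySem.Chars.lower c.toList) pl.toList <;>
        simp [h2, h3]

-- ===== VERDICT (by name: the statement is the Claim_ definition above) =====
theorem match_to_choice_spec : Claim_equal_match_to_choice := by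
  intro prediction choices _
  unfold Spec_match_to_choice match_to_choice match_to_choice_alt
  rw [pvScan_eq]
  simp [Option.orElse]
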